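-- pv_equiv track=rewrite | github.com/05bit/docta | docta/utils/meta.py | stripped
-- ===== SOURCE A (Python) =====
-- DELIMITER = '---'
--
-- def stripped(stream):
--     """
--     Read stream to strip YAML header, returns stripped data.
--     """
--     data = []
--     meta_started = False
--     meta_ended = False
--
--     # TODO: cleaner implementation?
--     for next_line in stream:
--         if meta_ended:  # done with meta, collecting data
--             data.append(next_line)
--         else:
--             if next_line.startswith(DELIMITER):
--                 if not meta_started:  # meta start found!
--                     meta_started = True
--                 else:  # meta end found!
--                     meta_ended = True
--             else:  # meta not found at all
--                 if not meta_started: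
--                     data.append(next_line)  # don't lose first line
--                     meta_ended = True
--
--     # TODO: Avoid double memory use? Oh yes, I'm aware
--     #       of premature optimization :)
--     return ''.join(data)
-- ===== SOURCE B (Python) =====
-- DELIMITER = '---'
--
-- def stripped(stream):
--     """
--     Read stream to strip YAML header, returns stripped data.
--     """
--     lines = list(stream)
--     if not lines or not lines[0].startswith(DELIMITER):
--         return ''.join(lines)
--     for i in range(1, len(lines)):
--         if lines[i].startswith(DELIMITER):
--             return ''.join(lines[i + 1:])
--     return ''
-- ===== Notes on version B (the rewrite author's own statement) =====
-- stated objective: simpler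
-- what changed: Replaces the streaming two-flag state machine with a materialize-then-slice form: keep everything when the first line is not a delimiter, otherwise join the lines after the first closing delimiter (or return '' if the header is unterminated).
import Mathlib
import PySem

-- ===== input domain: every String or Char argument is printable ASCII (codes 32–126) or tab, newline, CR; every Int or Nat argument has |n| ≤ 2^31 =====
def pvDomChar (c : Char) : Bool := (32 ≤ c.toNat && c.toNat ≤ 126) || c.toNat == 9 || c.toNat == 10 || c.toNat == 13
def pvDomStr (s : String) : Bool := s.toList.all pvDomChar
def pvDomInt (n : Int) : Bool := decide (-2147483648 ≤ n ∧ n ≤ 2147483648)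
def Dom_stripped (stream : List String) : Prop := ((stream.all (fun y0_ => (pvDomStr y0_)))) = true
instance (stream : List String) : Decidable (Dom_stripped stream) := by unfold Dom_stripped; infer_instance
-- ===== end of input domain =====

-- B replaces A's streaming two-flag state machine with a materialize-then-slice scan (simpler decomposition).

-- ===== PORT A =====
-- A's for-loop over the stream with state (data, meta_started, meta_ended), branches in source order.
def strippedLoop : List String → List String → Bool → Bool → List String
  | [], data, _, _ => data
  | l :: ls, data, metaStarted, metaEnded =>
    if metaEnded then strippedLoop ls (data ++ [l]) metaStarted metaEnded
    else
      if PySem.Str.startswith l "---" then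
        if !metaStarted then strippedLoop ls data true metaEnded
        else strippedLoop ls data metaStarted true
      else
        if !metaStarted then strippedLoop ls (data ++ [l]) metaStarted true
        else strippedLoop ls data metaStarted metaEnded

def stripped (stream : List String) : String :=
  PySem.Str.join "" (strippedLoop stream [] false false)

-- ===== PORT B =====
-- B's scan from index 1 for the first closing delimiter (the for-range loop of Source B).
def strippedAltScan : List String → String
  | [] => ""
  | r :: rs =>
    if PySem.Str.startswith r "---" then PySem.Str.join "" rs
    else strippedAltScan rs

def stripped_alt (stream : List String) : String :=
  match stream with
  | [] => PySem.Str.join "" ([] : List String)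
  | l0 :: rest =>
    if !(PySem.Str.startswith l0 "---") then PySem.Str.join "" (l0 :: rest)
    else strippedAltScan rest

-- ===== PRECONDITION & SPEC =====
def Spec_stripped (stream : List String) (out : String) : Prop := out = stripped_alt stream
instance (stream : List String) (out : String) : Decidable (Spec_stripped stream out) := by unfold Spec_stripped; infer_instance

-- ===== CLAIM (what is proved, stated in full; the proofs are below) =====
def Claim_equal_stripped : Prop := ∀ (stream : List String), Dom_stripped stream → Spec_stripped stream (stripped stream)

-- ===== LEMMAS AND PROOFS =====
-- once meta_ended is true, A's loop just appends every remaining line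
theorem strippedLoop_ended (ls : List String) (data : List String) (s : Bool) :
    strippedLoop ls data s true = data ++ ls := by
  induction ls generalizing data with
  | nil => simp [strippedLoop]
  | cons l ls ih => simp [strippedLoop, ih]

-- in state (started, not ended) with empty data, A's loop computes B's scan
theorem strippedLoop_started (ls : List String) :
    PySem.Str.join "" (strippedLoop ls [] true false) = strippedAltScan ls := by
  induction ls with
  | nil => simp [strippedLoop, strippedAltScan, PySem.Str.join]
  | cons l ls ih =>
    by_cases h : PySem.Chars.startswith l.toList ['-', '-', '-'] = true
    · simp [strippedLoop, strippedAltScan, PySem.Str.startswith, h, strippedLoop_ended]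
    · simp [strippedLoop, strippedAltScan, PySem.Str.startswith, h, ih]

-- ===== VERDICT (by name: the statement is the Claim_ definition above) =====
theorem stripped_spec : Claim_equal_stripped := by
  intro stream _
  unfold Spec_stripped
  match stream with
  | [] => rfl
  | l0 :: rest =>
    by_cases h : PySem.Chars.startswith l0.toList ['-', '-', '-'] = true
    · simp [stripped, stripped_alt, strippedLoop, PySem.Str.startswith, h, strippedLoop_started]
    · simp [stripped, stripped_alt, strippedLoop, PySem.Str.startswith, h, strippedLoop_ended]
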